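-- pv_equiv track=rewrite | github.com/koko-tsuu/ARCH2-SimuProject | src/sub_helpers.py | multiplicationDecimal
-- ===== SOURCE A (Python) =====
-- def multiplicationDecimal(sDecimal):
--     nCarryover = 0
--     sTemp = ''
--     sProduct = ''
--
--     for x in range(len(sDecimal)-1, 1, -1):
--         sTemp = str(nCarryover + int(sDecimal[x]) * 2)
--         if (len(sTemp) > 1):
--             # last digit
--             if (x == 2):
--                 sProduct = sTemp[0] + '.' + sTemp[1] + sProduct
--             else:
--                 nCarryover = int(sTemp[0])
--                 sProduct = sTemp[1] + sProduct
--
--         else: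
--             nCarryover = 0
--             if (x == 2):
--                 sProduct =  '0.' + sTemp[0] + sProduct
--             else:
--                 sProduct = sTemp[0] + sProduct
--
--     return sProduct
-- ===== SOURCE B (Python) =====
-- def multiplicationDecimal(sDecimal):
--     d = sDecimal[2:]
--     if not d:
--         return ''
--     n = 0
--     for c in d:
--         n = n * 10 + int(c)
--     s = str(2 * n).zfill(len(d) + 1)
--     return s[0] + '.' + s[1:]
-- ===== Notes on version B (the rewrite author's own statement) =====
-- stated objective: simpler
-- what changed: Replaces A's digit-by-digit carry-and-prepend loop (with special-cased last iteration) by a parse->multiply->format pipeline: accumulate the fractional digits into one integer, double it, zero-pad with zfill and insert the decimal point.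
import Mathlib
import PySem

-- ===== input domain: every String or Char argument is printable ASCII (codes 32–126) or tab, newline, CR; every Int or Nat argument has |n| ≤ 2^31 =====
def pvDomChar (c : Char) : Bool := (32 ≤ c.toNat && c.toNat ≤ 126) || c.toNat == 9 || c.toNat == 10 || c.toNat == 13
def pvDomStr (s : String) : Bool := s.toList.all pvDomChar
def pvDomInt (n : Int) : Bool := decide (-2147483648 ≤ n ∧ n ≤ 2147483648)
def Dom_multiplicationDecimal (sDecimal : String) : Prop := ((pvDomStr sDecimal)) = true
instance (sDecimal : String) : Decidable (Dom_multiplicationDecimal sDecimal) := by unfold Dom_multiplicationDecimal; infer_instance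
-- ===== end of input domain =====

-- B replaces A's digit-by-digit carry-and-prepend loop by a parse -> multiply -> format pipeline
-- (accumulate the fractional digits into one integer, double it, zero-pad, insert the point).


-- ===== PORT A =====
def multiplicationDecimal (sDecimal : String) : String :=
  let cs := sDecimal.toList
  let st :=
    (PySem.List.pyRange ((cs.length : Int) - 1) 1 (-1)).foldl
      (fun (st : Int × List Char) x =>
        let sTemp := PySem.Int.toChars
          (st.1 + (PySem.Int.ofStr? (String.ofList [PySem.List.pyGetD cs x ' '])).getD 0 * 2)
        if sTemp.length > 1 then
          if x = 2 then
            (st.1, sTemp.getD 0 ' ' :: '.' :: sTemp.getD 1 ' ' :: st.2)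
          else
            ((PySem.Int.ofStr? (String.ofList [sTemp.getD 0 ' '])).getD 0,
              sTemp.getD 1 ' ' :: st.2)
        else
          if x = 2 then
            ((0 : Int), '0' :: '.' :: sTemp.getD 0 ' ' :: st.2)
          else
            ((0 : Int), sTemp.getD 0 ' ' :: st.2))
      ((0 : Int), ([] : List Char))
  String.ofList st.2

-- ===== PORT B =====
def multiplicationDecimal_alt (sDecimal : String) : String :=
  let d := PySem.List.slice sDecimal.toList (some 2) none
  if d = [] then ""
  else
    let n := d.foldl (fun (n : Int) c => n * 10 + (PySem.Int.ofStr? (String.ofList [c])).getD 0) 0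
    let s := PySem.Chars.zfill (PySem.Int.toChars (2 * n)) ((d.length : Int) + 1)
    String.ofList (s.getD 0 ' ' :: '.' :: s.drop 1)

-- ===== PRECONDITION & SPEC =====
-- Pre_ excludes exactly the inputs where A raises ValueError: a non-digit character at index ≥ 2
-- (Python's int() on that single character fails).  B raises there too.
def Pre_multiplicationDecimal (sDecimal : String) : Prop :=
  ((sDecimal.toList.drop 2).all (fun c => 48 ≤ c.toNat && c.toNat ≤ 57)) = true
instance (sDecimal : String) : Decidable (Pre_multiplicationDecimal sDecimal) := by
  unfold Pre_multiplicationDecimal; infer_instance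
def pvWitness_multiplicationDecimal : String := "0.25"

def Spec_multiplicationDecimal (sDecimal : String) (out : String) : Prop :=
  out = multiplicationDecimal_alt sDecimal
instance (sDecimal : String) (out : String) : Decidable (Spec_multiplicationDecimal sDecimal out) := by
  unfold Spec_multiplicationDecimal; infer_instance

-- ===== CLAIM (what is proved, stated in full; the proofs are below) =====
def Claim_equal_multiplicationDecimal : Prop :=
  ∀ (sDecimal : String), Dom_multiplicationDecimal sDecimal →
    Pre_multiplicationDecimal sDecimal →
    Spec_multiplicationDecimal sDecimal (multiplicationDecimal sDecimal)

-- ===== LEMMAS AND PROOFS =====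

-- decimal digit value of a char
def digN (c : Char) : Nat := c.toNat - 48

-- decimal value of a digit string (most significant first)
def dVal (l : List Char) : Nat := l.foldl (fun n c => n * 10 + digN c) 0

-- decimal representation without leading zeros
def decRep (n : Nat) : List Char :=
  if h : n < 10 then [Nat.digitChar n]
  else decRep (n / 10) ++ [Nat.digitChar (n % 10)]
decreasing_by exact Nat.div_lt_self (by omega) (by omega)

-- decimal representation zero-padded to exactly k digits
def padRep : Nat → Nat → List Char
  | 0, _ => []
  | k + 1, v => padRep k (v / 10) ++ [Nat.digitChar (v % 10)]

-- the loop body of port A away from the last index (x ≠ 2)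
def stepA (st : Int × List Char) (c : Char) : Int × List Char :=
  let sTemp := PySem.Int.toChars (st.1 + (PySem.Int.ofStr? (String.ofList [c])).getD 0 * 2)
  if sTemp.length > 1 then
    ((PySem.Int.ofStr? (String.ofList [sTemp.getD 0 ' '])).getD 0, sTemp.getD 1 ' ' :: st.2)
  else ((0 : Int), sTemp.getD 0 ' ' :: st.2)

theorem digit_char_cases (c : Char) (h1 : 48 ≤ c.toNat) (h2 : c.toNat ≤ 57) :
    c = '0' ∨ c = '1' ∨ c = '2' ∨ c = '3' ∨ c = '4' ∨ c = '5' ∨ c = '6' ∨ c = '7' ∨ c = '8' ∨ c = '9' := by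
  have hc := Char.ofNat_toNat c
  interval_cases h : c.toNat <;> subst hc <;> decide

theorem ofStr?_digit (c : Char) (h1 : 48 ≤ c.toNat) (h2 : c.toNat ≤ 57) :
    PySem.Int.ofStr? (String.ofList [c]) = some (((c.toNat - 48 : Nat) : Int)) := by
  rcases digit_char_cases c h1 h2 with h|h|h|h|h|h|h|h|h|h <;> subst h <;> decide

theorem toDigitsCore_eq_decRep (f : Nat) : ∀ (n : Nat) (l : List Char), n < f →
    Nat.toDigitsCore 10 f n l = decRep n ++ l := by
  induction f with
  | zero => intro n l h; omega
  | succ f ih =>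
    intro n l h
    rw [Nat.toDigitsCore]
    by_cases h10 : n < 10
    · have hz : n / 10 = 0 := Nat.div_eq_of_lt h10
      simp only [hz, if_true]
      rw [decRep]
      simp [h10, Nat.mod_eq_of_lt h10]
    · have hne : ¬ (n / 10 = 0) := by
        intro hz; have := Nat.div_eq_of_lt (by omega : n < 10 * 1); omega
      simp only [hne, if_false]
      rw [ih (n / 10) _ (by omega)]
      conv_rhs => rw [decRep]
      simp [h10]

theorem toChars_natCast (n : Nat) : PySem.Int.toChars (n : Int) = decRep n := by
  have h : PySem.Int.toChars (n : Int) = Nat.toDigits 10 n := by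
    simp [PySem.Int.toChars]
  rw [h, Nat.toDigits, toDigitsCore_eq_decRep (n + 1) n [] (by omega), List.append_nil]

theorem padRep_zero (k : Nat) : padRep k 0 = List.replicate k '0' := by
  induction k with
  | zero => rfl
  | succ k ih => rw [padRep]; simp [ih, List.replicate_succ']; decide

theorem padRep_prepend (m c r : Nat) (hc : c < 10) (hr : r < 10 ^ m) :
    padRep (m + 1) (c * 10 ^ m + r) = Nat.digitChar c :: padRep m r := by
  induction m generalizing c r with
  | zero =>
    have hr0 : r = 0 := by simpa using hr
    subst hr0
    rw [padRep]
    simp [Nat.mod_eq_of_lt hc, Nat.div_eq_of_lt hc, padRep]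
  | succ m ih =>
    have hw : c * 10 ^ (m + 1) + r = 10 * (c * 10 ^ m) + r := by ring
    rw [padRep, hw, Nat.mul_add_div (by omega), Nat.mul_add_mod]
    have hr' : r / 10 < 10 ^ m := by
      apply Nat.div_lt_of_lt_mul; rw [pow_succ'] at hr; exact hr
    rw [ih c (r / 10) hc hr']
    conv_rhs => rw [padRep]
    simp

theorem decRep_head (v : Nat) :
    ∃ u t, decRep v = Nat.digitChar u :: t ∧ u < 10 := by
  induction v using Nat.strong_induction_on with
  | _ v ih =>
    by_cases h : v < 10
    · exact ⟨v, [], by rw [decRep]; simp [h], h⟩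
    · obtain ⟨u, t, ht, hu⟩ := ih (v / 10) (Nat.div_lt_self (by omega) (by omega))
      exact ⟨u, t ++ [Nat.digitChar (v % 10)], by rw [decRep]; simp [h, ht], hu⟩

theorem digitChar_not_sign (u : Nat) (hu : u < 10) :
    Nat.digitChar u ≠ '+' ∧ Nat.digitChar u ≠ '-' := by
  interval_cases u <;> decide

theorem zfill_pad (c : Char) (t : List Char) (hc1 : c ≠ '+') (hc2 : c ≠ '-') (w : Int) :
    PySem.Chars.zfill (c :: t) w =
      List.replicate (w.toNat - (c :: t).length) '0' ++ (c :: t) := by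
  rw [PySem.Chars.zfill]
  split_ifs with h hsign
  · simp only [List.length_cons] at h ⊢
    have h0 : w.toNat - (t.length + 1) = 0 := by omega
    simp [h0]
  · exact absurd hsign (by simp [hc1, hc2])
  · rfl

theorem pad_decRep (k : Nat) : ∀ v, v < 10 ^ (k + 1) →
    List.replicate (k + 1 - (decRep v).length) '0' ++ decRep v = padRep (k + 1) v := by
  induction k with
  | zero =>
    intro v hv
    have hv10 : v < 10 := by simpa using hv
    rw [decRep]
    simp only [hv10, dif_pos]
    rw [padRep]
    simp [Nat.mod_eq_of_lt hv10, Nat.div_eq_of_lt hv10, padRep]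
  | succ k ih =>
    intro v hv
    by_cases h : v < 10
    · rw [decRep]
      simp only [h, dif_pos]
      rw [padRep, Nat.div_eq_of_lt h, Nat.mod_eq_of_lt h, padRep_zero]
      simp
    · rw [decRep]
      simp only [h, dif_neg, not_false_iff]
      have hlen : (decRep (v / 10) ++ [Nat.digitChar (v % 10)]).length
          = (decRep (v / 10)).length + 1 := by simp
      rw [hlen]
      have hsub : k + 1 + 1 - ((decRep (v / 10)).length + 1)
          = k + 1 - (decRep (v / 10)).length := by omega
      rw [hsub, ← List.append_assoc,
        ih (v / 10) (by apply Nat.div_lt_of_lt_mul; rw [pow_succ'] at hv; exact hv)]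
      conv_rhs => rw [padRep]

theorem dVal_aux (l : List Char) : ∀ (a : Nat),
    l.foldl (fun n c => n * 10 + digN c) a = a * 10 ^ l.length + dVal l := by
  induction l with
  | nil => intro a; simp [dVal]
  | cons c l ih =>
    intro a
    show l.foldl _ (a * 10 + digN c) = _
    rw [ih (a * 10 + digN c)]
    have h : dVal (c :: l) = dVal l + digN c * 10 ^ l.length := by
      show l.foldl _ (0 * 10 + digN c) = _
      rw [ih (0 * 10 + digN c)]; ring
    rw [h]
    simp [List.length_cons, pow_succ]; ring

theorem dVal_cons (c : Char) (l : List Char) :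
    dVal (c :: l) = digN c * 10 ^ l.length + dVal l := by
  show l.foldl _ (0 * 10 + digN c) = _
  rw [dVal_aux]; ring

theorem foldr_congr_mem {α β : Type} (l : List α) (f g : α → β → β) (i : β)
    (h : ∀ x ∈ l, ∀ st, f x st = g x st) : l.foldr f i = l.foldr g i := by
  induction l with
  | nil => rfl
  | cons a l ih =>
    simp only [List.foldr_cons]
    rw [h a (by simp), ih (fun x hx st => h x (by simp [hx]) st)]

theorem foldl_int_eq (l : List Char) (h : ∀ c ∈ l, 48 ≤ c.toNat ∧ c.toNat ≤ 57) : ∀ (a : Nat),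
    l.foldl (fun (n : Int) c => n * 10 + (PySem.Int.ofStr? (String.ofList [c])).getD 0) (a : Int)
      = ((l.foldl (fun n c => n * 10 + digN c) a : Nat) : Int) := by
  induction l with
  | nil => intro a; rfl
  | cons c l ih =>
    intro a
    have hc := h c (by simp)
    simp only [List.foldl_cons]
    rw [ofStr?_digit c hc.1 hc.2]
    simp only [Option.getD_some]
    have harith : (a : Int) * 10 + (((c.toNat - 48 : Nat)) : Int) = ((a * 10 + digN c : Nat) : Int) := by
      unfold digN; push_cast; ring
    rw [harith, ih (fun x hx => h x (by simp [hx]))]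

theorem mul_bound (t r P : Nat) (ht : t < 10) (hr : r < P) : t * P + r < 10 * P := by
  nlinarith

theorem loopA_inv (es : List Char) (hd : ∀ c ∈ es, 48 ≤ c.toNat ∧ c.toNat ≤ 57) :
    ∃ (cN r : Nat), 2 * dVal es = cN * 10 ^ es.length + r ∧ r < 10 ^ es.length ∧ cN ≤ 1 ∧
      es.foldr (fun c st => stepA st c) ((0 : Int), ([] : List Char))
        = ((cN : Int), padRep es.length r) := by
  induction es with
  | nil => exact ⟨0, 0, by simp [dVal], by simp, by omega, by simp [padRep]⟩
  | cons e es ih =>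
    obtain ⟨cN, r, hsum, hr, hc1, hfold⟩ := ih (fun c hc => hd c (by simp [hc]))
    have he := hd e (by simp)
    have hde10 : digN e < 10 := by unfold digN; omega
    simp only [List.foldr_cons, hfold]
    rw [stepA]
    simp only [ofStr?_digit e he.1 he.2, Option.getD_some]
    have harg : (cN : Int) + ((e.toNat - 48 : Nat) : Int) * 2 = ((2 * digN e + cN : Nat) : Int) := by
      unfold digN; push_cast; ring
    rw [harg, toChars_natCast]
    set tn := 2 * digN e + cN with htn
    have hsum' : 2 * dVal (e :: es) = tn * 10 ^ es.length + r := by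
      rw [dVal_cons]
      calc 2 * (digN e * 10 ^ es.length + dVal es)
          = 2 * digN e * 10 ^ es.length + 2 * dVal es := by ring
        _ = 2 * digN e * 10 ^ es.length + (cN * 10 ^ es.length + r) := by rw [hsum]
        _ = tn * 10 ^ es.length + r := by rw [htn]; ring
    by_cases h10 : tn < 10
    · -- single-digit temp, carry 0
      rw [decRep]
      simp only [h10, dif_pos]
      refine ⟨0, tn * 10 ^ es.length + r, ?_, ?_, by omega, ?_⟩
      · simpa using hsum'
      · rw [List.length_cons, pow_succ']
        exact mul_bound tn r _ h10 hr
      · simp only [List.length_singleton, gt_iff_lt, Nat.lt_irrefl, if_false]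
        rw [List.length_cons, padRep_prepend es.length tn r h10 hr]
        simp
    · -- two-digit temp, carry 1
      have hlt20 : tn < 20 := by omega
      have hdiv : tn / 10 = 1 := by omega
      have hdec1 : decRep 1 = ['1'] := by rw [decRep]; rw [dif_pos (by omega)]; decide
      have hsTemp : decRep tn = ['1', Nat.digitChar (tn % 10)] := by
        rw [decRep]
        simp [h10, hdiv, hdec1]
      rw [hsTemp]
      have hu : tn % 10 = tn - 10 := by omega
      have hu10 : tn % 10 < 10 := by omega
      refine ⟨1, (tn % 10) * 10 ^ es.length + r, ?_, ?_, by omega, ?_⟩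
      · rw [hsum', List.length_cons, pow_succ']
        have h1 : tn = 10 + tn % 10 := by omega
        calc tn * 10 ^ es.length + r
            = (10 + tn % 10) * 10 ^ es.length + r := by rw [← h1]
          _ = 1 * (10 * 10 ^ es.length) + (tn % 10 * 10 ^ es.length + r) := by ring
      · rw [List.length_cons, pow_succ']
        exact mul_bound _ r _ hu10 hr
      · rw [if_pos (by simp)]
        simp only [List.getD_cons_zero, List.getD_cons_succ]
        have hone : (PySem.Int.ofStr? (String.ofList ['1'])).getD 0 = ((1 : Nat) : Int) := by decide
        rw [hone, List.length_cons, padRep_prepend es.length (tn % 10) r hu10 hr]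


-- port A, written with its loop body as a named function (definitionally equal)
def fullStep (cs : List Char) (st : Int × List Char) (x : Int) : Int × List Char :=
  let sTemp := PySem.Int.toChars
    (st.1 + (PySem.Int.ofStr? (String.ofList [PySem.List.pyGetD cs x ' '])).getD 0 * 2)
  if sTemp.length > 1 then
    if x = 2 then
      (st.1, sTemp.getD 0 ' ' :: '.' :: sTemp.getD 1 ' ' :: st.2)
    else
      ((PySem.Int.ofStr? (String.ofList [sTemp.getD 0 ' '])).getD 0, sTemp.getD 1 ' ' :: st.2)
  else
    if x = 2 then
      ((0 : Int), '0' :: '.' :: sTemp.getD 0 ' ' :: st.2)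
    else
      ((0 : Int), sTemp.getD 0 ' ' :: st.2)

theorem portA_eq (s : String) : multiplicationDecimal s
    = String.ofList (((PySem.List.pyRange ((s.toList.length : Int) - 1) 1 (-1)).foldl
        (fullStep s.toList) ((0 : Int), ([] : List Char))).2) := rfl

theorem fullStep_ne2 (cs : List Char) (st : Int × List Char) (x : Int) (hx : ¬ (x = 2)) :
    fullStep cs st x = stepA st (PySem.List.pyGetD cs x ' ') := by
  simp only [fullStep, stepA, if_neg hx]

theorem main_eq (s : String) (hpre : ∀ c ∈ s.toList.drop 2, 48 ≤ c.toNat ∧ c.toNat ≤ 57) :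
    multiplicationDecimal s = multiplicationDecimal_alt s := by
  rw [portA_eq]
  simp only [multiplicationDecimal_alt]
  have hslice : PySem.List.slice s.toList (some 2) none = s.toList.drop 2 := by
    have h := PySem.List.slice_from (xs := s.toList) (a := 2) (by norm_num)
    simpa using h
  rcases hd2 : s.toList.drop 2 with _ | ⟨d0, es⟩
  · -- fewer than three characters: both return the empty string
    have hlen : s.toList.length ≤ 2 := by
      have h := List.drop_eq_nil_iff.mp hd2
      omega
    have hrange : PySem.List.pyRange ((s.toList.length : Int) - 1) 1 (-1) = [] := by
      apply PySem.List.pyRange_neg_one_eq_nil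
      have : (s.toList.length : Int) ≤ 2 := by exact_mod_cast hlen
      omega
    rw [hrange, hslice, hd2]
    simp
  · -- at least three characters
    have hd3 : s.toList.drop 3 = es := by
      have h31 : s.toList.drop 3 = (s.toList.drop 2).drop 1 := by
        rw [List.drop_drop]
      rw [h31, hd2]
      rfl
    have hlen3 : 3 ≤ s.toList.length := by
      have h := congrArg List.length hd2
      rw [List.length_drop, List.length_cons] at h
      omega
    have hdigits : ∀ c ∈ d0 :: es, 48 ≤ c.toNat ∧ c.toNat ≤ 57 :=
      fun c hc => hpre c (hd2 ▸ hc)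
    have hesdig : ∀ c ∈ es, 48 ≤ c.toNat ∧ c.toNat ≤ 57 :=
      fun c hc => hdigits c (by simp [hc])
    have hd0 := hdigits d0 (by simp)
    -- rewrite A's countdown range as the reverse of an ascending one and peel off index 2
    have h1 : PySem.List.pyRange ((s.toList.length : Int) - 1) 1 (-1)
        = (PySem.List.pyRange 2 (s.toList.length : Int) 1).reverse := by
      rw [PySem.List.pyRange_neg_one_eq_reverse]
      norm_num
    have hL : (2 : Int) < (s.toList.length : Int) := by exact_mod_cast hlen3
    rw [h1, List.foldl_reverse, PySem.List.pyRange_one_cons hL, List.foldr_cons]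
    have h23 : (2 : Int) + 1 = 3 := by norm_num
    rw [h23]
    -- the inner fold (indices 3 .. len-1) is A's carry loop over es
    have hmap : (PySem.List.pyRange 3 (s.toList.length : Int) 1).map
          (fun j => PySem.List.pyGetD s.toList j ' ') = s.toList.drop 3 := by
      have h := PySem.List.map_pyGetD_pyRange s.toList ' ' (a := 3) (by norm_num)
      rw [PySem.List.len_eq] at h
      simpa using h
    obtain ⟨cN, r, hsum, hr, hcar, hfold⟩ := loopA_inv es hesdig
    have hinner : (PySem.List.pyRange 3 (s.toList.length : Int) 1).foldr
          (fun x y => fullStep s.toList y x) ((0 : Int), ([] : List Char))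
        = ((cN : Int), padRep es.length r) := by
      rw [← hfold]
      conv_rhs => rw [← hd3, ← hmap, List.foldr_map]
      apply foldr_congr_mem
      intro x hx st
      have hx3 : (3 : Int) ≤ x := (PySem.List.mem_pyRange_one.mp hx).1
      exact fullStep_ne2 s.toList st x (by omega)
    rw [hinner]
    -- the character at index 2
    have hget2 : PySem.List.pyGetD s.toList (2 : Int) ' ' = d0 := by
      have h2 : ((2 : Nat) : Int) = (2 : Int) := by norm_num
      rw [← h2, PySem.List.pyGetD_natCast]
      have h0 : (s.toList.drop 2)[0]? = some d0 := by rw [hd2]; rfl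
      rw [List.getElem?_drop] at h0
      norm_num at h0
      simp [List.getD_eq_getElem?_getD, h0]
    -- B's accumulated integer is the value of the digit string
    have hn : (d0 :: es).foldl
          (fun (n : Int) c => n * 10 + (PySem.Int.ofStr? (String.ofList [c])).getD 0) 0
        = ((dVal (d0 :: es) : Nat) : Int) := by
      have h := foldl_int_eq (d0 :: es) hdigits 0
      simpa [dVal] using h
    rw [hslice, hd2, if_neg (by simp), hn]
    have hcast : (2 : Int) * ((dVal (d0 :: es) : Nat) : Int)
        = ((2 * dVal (d0 :: es) : Nat) : Int) := by push_cast; ring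
    rw [hcast, toChars_natCast]
    -- arithmetic facts
    have hdg : digN d0 < 10 := by unfold digN; omega
    have htn : 2 * dVal (d0 :: es) = (2 * digN d0 + cN) * 10 ^ es.length + r := by
      rw [dVal_cons]
      calc 2 * (digN d0 * 10 ^ es.length + dVal es)
          = 2 * digN d0 * 10 ^ es.length + 2 * dVal es := by ring
        _ = 2 * digN d0 * 10 ^ es.length + (cN * 10 ^ es.length + r) := by rw [hsum]
        _ = (2 * digN d0 + cN) * 10 ^ es.length + r := by ring
    have hq10 : (2 * digN d0 + cN) / 10 < 10 := by omega
    have hu10 : (2 * digN d0 + cN) % 10 < 10 := by omega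
    have hWsplit : 2 * dVal (d0 :: es)
        = ((2 * digN d0 + cN) / 10) * 10 ^ (es.length + 1)
          + (((2 * digN d0 + cN) % 10) * 10 ^ es.length + r) := by
      rw [htn, pow_succ']
      have hqu : 2 * digN d0 + cN = 10 * ((2 * digN d0 + cN) / 10) + (2 * digN d0 + cN) % 10 := by
        omega
      calc (2 * digN d0 + cN) * 10 ^ es.length + r
          = (10 * ((2 * digN d0 + cN) / 10) + (2 * digN d0 + cN) % 10) * 10 ^ es.length + r := by
            rw [← hqu]
        _ = ((2 * digN d0 + cN) / 10) * (10 * 10 ^ es.length)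
            + (((2 * digN d0 + cN) % 10) * 10 ^ es.length + r) := by ring
    have hbnd : ((2 * digN d0 + cN) % 10) * 10 ^ es.length + r < 10 ^ (es.length + 1) := by
      rw [pow_succ']
      exact mul_bound _ r _ hu10 hr
    have hWlt : 2 * dVal (d0 :: es) < 10 ^ (es.length + 1 + 1) := by
      have h := mul_bound ((2 * digN d0 + cN) / 10) _ _ hq10 hbnd
      have hp : (10 : Nat) ^ (es.length + 1 + 1) = 10 * 10 ^ (es.length + 1) :=
        pow_succ' 10 (es.length + 1)
      omega
    -- B's zero-padded digit list
    obtain ⟨u0, t0, hhead, hu0⟩ := decRep_head (2 * dVal (d0 :: es))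
    have hzf : PySem.Chars.zfill (decRep (2 * dVal (d0 :: es))) (((d0 :: es).length : Int) + 1)
        = padRep (es.length + 1 + 1) (2 * dVal (d0 :: es)) := by
      rw [hhead, zfill_pad _ _ (digitChar_not_sign u0 hu0).1 (digitChar_not_sign u0 hu0).2, ← hhead]
      have hw : ((((d0 :: es).length : Int) + 1)).toNat = es.length + 1 + 1 := by
        simp only [List.length_cons]
        omega
      rw [hw]
      exact pad_decRep (es.length + 1) _ hWlt
    rw [hzf]
    conv_rhs => rw [hWsplit]
    rw [padRep_prepend _ _ _ hq10 hbnd, padRep_prepend _ _ _ hu10 hr]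
    -- evaluate A's final loop step (x = 2)
    show String.ofList (fullStep s.toList ((cN : Int), padRep es.length r) 2).2 = _
    rw [fullStep]
    simp only [hget2, ofStr?_digit d0 hd0.1 hd0.2, Option.getD_some]
    have harg : (cN : Int) + ((d0.toNat - 48 : Nat) : Int) * 2
        = ((2 * digN d0 + cN : Nat) : Int) := by
      unfold digN; push_cast; ring
    rw [harg, toChars_natCast]
    have hdc0 : Nat.digitChar 0 = '0' := by decide
    have hdc1 : Nat.digitChar 1 = '1' := by decide
    by_cases h10 : 2 * digN d0 + cN < 10
    · have hq0 : (2 * digN d0 + cN) / 10 = 0 := by omega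
      have hu : (2 * digN d0 + cN) % 10 = 2 * digN d0 + cN := by omega
      conv_lhs => rw [decRep]
      rw [dif_pos h10]
      rw [hq0, hu, hdc0]
      simp
    · have hq1 : (2 * digN d0 + cN) / 10 = 1 := by omega
      have hdec1 : decRep 1 = ['1'] := by rw [decRep]; rw [dif_pos (by omega)]; decide
      have hsTemp : decRep (2 * digN d0 + cN)
          = ['1', Nat.digitChar ((2 * digN d0 + cN) % 10)] := by
        conv_lhs => rw [decRep]
        rw [dif_neg h10]
        have hd10 : (2 * digN d0 + cN) / 10 = 1 := hq1
        rw [hd10, hdec1]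
        rfl
      rw [hsTemp, hq1, hdc1]
      simp

-- ===== VERDICT (by name: the statement is the Claim_ definition above) =====
theorem multiplicationDecimal_spec : Claim_equal_multiplicationDecimal := by
  intro s _ hpre
  unfold Spec_multiplicationDecimal
  unfold Pre_multiplicationDecimal at hpre
  exact main_eq s (by simpa using hpre)
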